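-- pv_equiv track=rewrite | github.com/guoronghua/python3_practice | algorithm_practice.py | dec_to_bin_or_oct
-- ===== SOURCE A (Python) =====
-- def dec_to_bin_or_oct(num, base):
--     """十进制转二进制 或八进制 base=2 或者 8"""
--     l = []  # 创建一个空列表
--     if num < 0:  # 是负数转换成整数
--         return "-" + dec_to_bin_or_oct(abs(num), base)  # 如过是负数，先转换成正数
--     while True:
--         num, reminder = divmod(num, base)  # 短除法，对2求，分别得到除数 和 余数、这是 Python 的特有的一个内置方法，分别可以到商 及 余数
--         l.append(str(reminder))  # 把获得的余数 存入字符串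
--         if num == 0:  # 对应了前面的话，当商为 0时，就结束啦
--             return "".join(l[::-1])  # 对列表中的字符串进行逆序拼接，得到一个二进制字符串
-- ===== SOURCE B (Python) =====
-- def dec_to_bin_or_oct(num, base):
--     """十进制转二进制 或八进制 base=2 或者 8"""
--     if num < 0:
--         return "-" + dec_to_bin_or_oct(-num, base)
--     if num < base:
--         return str(num)
--     return dec_to_bin_or_oct(num // base, base) + str(num % base)
-- ===== Notes on version B (the rewrite author's own statement) =====
-- stated objective: simpler
-- what changed: Replaced the while-loop that collects remainder strings in a list and joins its [::-1] reversal by direct structural recursion on num // base that appends the least-significant digit after the recursive result, eliminating the list and the reversal.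
-- outside the precondition, e.g. on dec_to_bin_or_oct(5, -2): A returns '-1-1-1-1', B raises RecursionError; on dec_to_bin_or_oct(0, 1): A returns '0', B returns '0'
import Mathlib
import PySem

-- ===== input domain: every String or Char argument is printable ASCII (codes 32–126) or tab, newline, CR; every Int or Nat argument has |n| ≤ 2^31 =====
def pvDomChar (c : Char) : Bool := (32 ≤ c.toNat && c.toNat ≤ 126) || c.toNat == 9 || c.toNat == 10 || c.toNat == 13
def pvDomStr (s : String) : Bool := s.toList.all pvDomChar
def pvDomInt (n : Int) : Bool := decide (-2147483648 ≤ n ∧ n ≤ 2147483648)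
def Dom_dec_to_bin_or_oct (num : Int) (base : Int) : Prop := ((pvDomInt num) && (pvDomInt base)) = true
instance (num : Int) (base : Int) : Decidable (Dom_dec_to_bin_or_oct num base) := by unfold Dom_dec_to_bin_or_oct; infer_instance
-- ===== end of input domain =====

-- B replaces A's while-loop + remainder list + [::-1] reversal by direct recursion on num // base (simpler; same cost).

-- ===== PORT A =====
-- the 'while True' loop, carrying the list l of remainder strings; the dite guard only
-- ensures totality in Lean (it is never taken when 2 ≤ base, see Pre_ below)
def decToBinOrOctLoopA (num : Int) (base : Int) (l : List String) : String :=
  let q := PySem.Int.floordiv num base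
  let r := PySem.Int.mod num base
  let l' := l ++ [PySem.Int.toStr r]
  if q = 0 then PySem.Str.join "" l'.reverse   -- "".join(l[::-1]); [::-1] is List.reverse (PySem.List.slice?_none_none_neg_one)
  else if _h : q.toNat < num.toNat then decToBinOrOctLoopA q base l'
  else PySem.Str.join "" l'.reverse            -- totality guard, unreachable for 2 ≤ base
termination_by num.toNat

def dec_to_bin_or_oct (num : Int) (base : Int) : String :=
  if _h : num < 0 then "-" ++ dec_to_bin_or_oct (-num) base
  else decToBinOrOctLoopA num base []
termination_by (if num < 0 then 1 else 0 : Nat)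
decreasing_by simp_all; omega

-- ===== PORT B =====
-- the dite guard only ensures totality in Lean (never taken when 2 ≤ base, see Pre_ below)
def dec_to_bin_or_oct_alt (num : Int) (base : Int) : String :=
  if _h : num < 0 then "-" ++ dec_to_bin_or_oct_alt (-num) base
  else if num < base then PySem.Int.toStr num
  else if _h : 0 ≤ PySem.Int.floordiv num base ∧ (PySem.Int.floordiv num base).toNat < num.toNat then
    dec_to_bin_or_oct_alt (PySem.Int.floordiv num base) base ++ PySem.Int.toStr (PySem.Int.mod num base)
  else PySem.Int.toStr num                     -- totality guard, unreachable for 2 ≤ base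
termination_by ((if num < 0 then 1 else 0 : Nat), num.toNat)
decreasing_by
  · simp only [Prod.lex_iff]; split_ifs <;> omega
  · simp only [Prod.lex_iff]; split_ifs <;> omega

-- ===== PRECONDITION & SPEC =====
-- Pre_ excludes base < 2, where A raises ZeroDivisionError (base = 0) or loops forever
-- (base = 1 or -1 with num ≠ 0), or — for base ≤ -2 — returns accidental multi-sign digit
-- strings on which B's recursion does not terminate (RecursionError).
def Pre_dec_to_bin_or_oct (num : Int) (base : Int) : Prop := 2 ≤ base
instance (num : Int) (base : Int) : Decidable (Pre_dec_to_bin_or_oct num base) := by unfold Pre_dec_to_bin_or_oct; infer_instance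
def pvWitness_dec_to_bin_or_oct : Int × Int := (10, 2)

def Spec_dec_to_bin_or_oct (num : Int) (base : Int) (out : String) : Prop := out = dec_to_bin_or_oct_alt num base
instance (num : Int) (base : Int) (out : String) : Decidable (Spec_dec_to_bin_or_oct num base out) := by unfold Spec_dec_to_bin_or_oct; infer_instance

-- ===== CLAIM (what is proved, stated in full; the proofs are below) =====
def Claim_equal_dec_to_bin_or_oct : Prop := ∀ (num : Int) (base : Int), Dom_dec_to_bin_or_oct num base → Pre_dec_to_bin_or_oct num base → Spec_dec_to_bin_or_oct num base (dec_to_bin_or_oct num base)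

-- ===== LEMMAS AND PROOFS =====

theorem join_empty_cons (s : String) (xs : List String) :
    PySem.Str.join "" (s :: xs) = s ++ PySem.Str.join "" xs := by
  simp [PySem.Str.join, PySem.Chars.join, List.intercalate]
  rw [← String.toList_inj]
  cases xs <;> simp [String.toList_append]

theorem join_empty_nil : PySem.Str.join "" ([] : List String) = "" := by
  simp [PySem.Str.join, PySem.Chars.join, List.intercalate]

-- the loop with accumulator l computes B's digits followed by l reversed and joined
theorem loopA_eq_alt (base : Int) (hb : 2 ≤ base) (num : Int) (hnum : 0 ≤ num) :
    ∀ l : List String, decToBinOrOctLoopA num base l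
        = dec_to_bin_or_oct_alt num base ++ PySem.Str.join "" l.reverse := by
  have hb0 : (0:Int) < base := by omega
  generalize hN : num.toNat = N
  induction N using Nat.strong_induction_on generalizing num with
  | _ N ih =>
  intro l
  have hq : PySem.Int.floordiv num base = num / base := PySem.Int.floordiv_eq_ediv_of_pos hb0
  have hr : PySem.Int.mod num base = num % base := PySem.Int.mod_eq_emod_of_pos hb0
  rw [decToBinOrOctLoopA]
  rw [dec_to_bin_or_oct_alt]
  by_cases hlt : num < base
  · have hq0 : num / base = 0 := Int.ediv_eq_zero_of_lt hnum hlt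
    have hr0 : num % base = num := Int.emod_eq_of_lt hnum hlt
    simp [hq, hr, hq0, hr0, hlt, not_lt.mpr hnum, join_empty_cons]
  · have hnum1 : 0 < num := by omega
    have hq1 : 1 ≤ num / base := Int.le_ediv_iff_mul_le hb0 |>.mpr (by omega)
    have hqlt : num / base < num := by
      rw [← hq]; exact (PySem.Int.floordiv_lt_iff_lt_mul hb0).mpr (by nlinarith)
    have hguard : (num / base).toNat < num.toNat := by omega
    simp only [hq, hr, show ¬ num < 0 by omega, if_neg hlt,
      if_neg (show ¬ num / base = 0 by omega), dif_pos hguard,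
      dif_pos (show 0 ≤ num / base ∧ (num / base).toNat < num.toNat from ⟨by omega, hguard⟩)]
    rw [dif_neg not_false]
    rw [ih (num / base).toNat (by omega) (num / base) (by omega) rfl]
    rw [List.reverse_append, List.reverse_singleton, List.singleton_append, join_empty_cons]
    rw [String.append_assoc]

-- ===== VERDICT (by name: the statement is the Claim_ definition above) =====
theorem dec_to_bin_or_oct_spec : Claim_equal_dec_to_bin_or_oct := by
  intro num base _hd hb
  unfold Spec_dec_to_bin_or_oct
  rw [dec_to_bin_or_oct]
  by_cases hn : num < 0
  · rw [dif_pos hn, dec_to_bin_or_oct_alt, dif_pos hn, dec_to_bin_or_oct, dif_neg (show ¬ -num < 0 by omega),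
      loopA_eq_alt base hb (-num) (by omega), List.reverse_nil, join_empty_nil, String.append_empty]
  · rw [dif_neg hn,
      loopA_eq_alt base hb num (by omega), List.reverse_nil, join_empty_nil, String.append_empty]
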